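-- pv_equiv track=rewrite | github.com/RuixiangLiuWHU/CODGGS-GDC | COGParse/Bytes_Parse.py | get_bytes_array
-- ===== SOURCE A (Python) =====
-- def get_bytes_array(start_pos, type_size, header, image_width, image_height, band_count):
--     strip_offsets = []
--     if image_width % 256 == 0:
--         tile_count_x = image_width // 256
--     else:
--         tile_count_x = image_width // 256 + 1
--     if image_height % 256 == 0:
--         tile_count_y = image_height // 256
--     else:
--         tile_count_y = image_height // 256 + 1
--     for _ in range(band_count):
--         for i in range(tile_count_y):
--             offsets = []
--             for j in range(tile_count_x):
--                 v = get_long(header, start_pos + (i * tile_count_x + j) * type_size, type_size)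
--                 offsets.append(v)
--             strip_offsets.append(offsets)
--     return strip_offsets
--
-- def get_long(header_bytes_bytes, start, length):
--     value = 0
--     for i in range(length):
--         value |= (header_bytes_bytes[start + i] & 0xff) << (8 * i)
--         if value < 0:
--             value += 256 << (i * 8)
--     return value
-- ===== SOURCE B (Python) =====
-- def get_bytes_array(start_pos, type_size, header, image_width, image_height, band_count):
--     # One flat pass over all tile values, reshape into one band by slicing, replicate per band.
--     # With no bands to emit there is nothing to read.
--     if band_count <= 0:
--         return []
--     tile_count_x = -(-image_width // 256)
--     tile_count_y = -(-image_height // 256)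
--     flat = [get_long(header, start_pos + k * type_size, type_size)
--             for k in range(max(tile_count_x, 0) * max(tile_count_y, 0))]
--     band = [flat[r * tile_count_x:(r + 1) * tile_count_x] for r in range(tile_count_y)]
--     return [list(row) for _ in range(band_count) for row in band]
--
-- def get_long(header_bytes_bytes, start, length):
--     value = 0
--     for i in range(length):
--         value |= (header_bytes_bytes[start + i] & 0xff) << (8 * i)
--         if value < 0:
--             value += 256 << (i * 8)
--     return value
-- ===== Notes on version B (the rewrite author's own statement) =====
-- stated objective: alternative
-- what changed: B replaces A's three nested append loops by one flat pass reading all tile values (skipped entirely when band_count <= 0), a slicing reshape of that buffer into one band, and replication of the band block per band, with the ceiling tile counts computed as -(-w//256).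
import Mathlib
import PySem

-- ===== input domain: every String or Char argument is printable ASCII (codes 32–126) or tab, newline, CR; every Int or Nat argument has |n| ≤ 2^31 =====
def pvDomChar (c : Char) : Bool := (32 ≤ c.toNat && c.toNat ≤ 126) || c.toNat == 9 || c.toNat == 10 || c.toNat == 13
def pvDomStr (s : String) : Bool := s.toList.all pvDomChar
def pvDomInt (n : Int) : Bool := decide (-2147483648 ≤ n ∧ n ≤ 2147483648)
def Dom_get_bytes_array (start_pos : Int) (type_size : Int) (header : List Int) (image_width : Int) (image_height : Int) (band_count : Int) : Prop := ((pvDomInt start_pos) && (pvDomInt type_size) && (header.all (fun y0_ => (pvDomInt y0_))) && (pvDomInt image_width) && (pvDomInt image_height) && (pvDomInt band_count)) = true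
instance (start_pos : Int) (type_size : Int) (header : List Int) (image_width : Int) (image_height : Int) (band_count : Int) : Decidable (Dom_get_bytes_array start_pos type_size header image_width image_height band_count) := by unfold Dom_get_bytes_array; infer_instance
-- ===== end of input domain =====

-- B replaces the three nested loops by one flat pass over all tiles (skipped when there are
-- no bands), a slicing reshape into one band, and replication of that band per band
-- (objective: alternative decomposition).

-- ===== PORT A =====
-- shared helper: both Pythons contain the identical get_long; header[start+i] is ported with
-- pyGetD (default 0) — Pre_ excludes the out-of-range accesses where Python raises IndexError;
-- the shift amounts 8*i, i*8 are nonnegative for i from range(length), so .toNat is exact there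
def pvGetLong (header : List Int) (start len : Int) : Int :=
  (PySem.List.pyRange 0 len 1).foldl
    (fun value i =>
      let v := PySem.Int.bor value ((PySem.Int.band (PySem.List.pyGetD header (start + i) 0) 255) <<< (8 * i).toNat)
      if v < 0 then v + ((256 : Int) <<< (i * 8).toNat) else v) 0

def get_bytes_array (start_pos : Int) (type_size : Int) (header : List Int) (image_width : Int) (image_height : Int) (band_count : Int) : List (List Int) :=
  let tile_count_x := if PySem.Int.mod image_width 256 = 0 then PySem.Int.floordiv image_width 256 else PySem.Int.floordiv image_width 256 + 1
  let tile_count_y := if PySem.Int.mod image_height 256 = 0 then PySem.Int.floordiv image_height 256 else PySem.Int.floordiv image_height 256 + 1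
  (PySem.List.pyRange 0 band_count 1).foldl (fun strip_offsets _ =>
    (PySem.List.pyRange 0 tile_count_y 1).foldl (fun strip_offsets i =>
      strip_offsets ++ [(PySem.List.pyRange 0 tile_count_x 1).foldl (fun offsets j =>
        offsets ++ [pvGetLong header (start_pos + (i * tile_count_x + j) * type_size) type_size]) []]) strip_offsets) []

-- ===== PORT B =====
def get_bytes_array_alt (start_pos : Int) (type_size : Int) (header : List Int) (image_width : Int) (image_height : Int) (band_count : Int) : List (List Int) :=
  if band_count ≤ 0 then []
  else
    let tile_count_x := -(PySem.Int.floordiv (-image_width) 256)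
    let tile_count_y := -(PySem.Int.floordiv (-image_height) 256)
    let flat := (PySem.List.pyRange 0 (max tile_count_x 0 * max tile_count_y 0) 1).map
      (fun k => pvGetLong header (start_pos + k * type_size) type_size)
    let band := (PySem.List.pyRange 0 tile_count_y 1).map
      (fun r => PySem.List.slice flat (some (r * tile_count_x)) (some ((r + 1) * tile_count_x)))
    (PySem.List.pyRange 0 band_count 1).flatMap (fun _ => band)

-- ===== PRECONDITION & SPEC =====
-- Pre_ excludes exactly the inputs on which Python A raises IndexError: a read is performed
-- (band_count, both tile counts and type_size all positive) and some read index
-- start_pos + k*type_size + i falls outside the header.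
def Pre_get_bytes_array (start_pos : Int) (type_size : Int) (header : List Int) (image_width : Int) (image_height : Int) (band_count : Int) : Prop :=
  let tx := -(PySem.Int.floordiv (-image_width) 256)
  let ty := -(PySem.Int.floordiv (-image_height) 256)
  (0 < band_count ∧ 0 < tx ∧ 0 < ty ∧ 0 < type_size) →
    (-(header.length : Int) ≤ start_pos ∧ start_pos + tx * ty * type_size ≤ header.length)
instance (start_pos : Int) (type_size : Int) (header : List Int) (image_width : Int) (image_height : Int) (band_count : Int) : Decidable (Pre_get_bytes_array start_pos type_size header image_width image_height band_count) := by unfold Pre_get_bytes_array; infer_instance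

def pvWitness_get_bytes_array : Int × Int × List Int × Int × Int × Int := (0, 1, [5, 6], 256, 512, 1)

def Spec_get_bytes_array (start_pos : Int) (type_size : Int) (header : List Int) (image_width : Int) (image_height : Int) (band_count : Int) (out : List (List Int)) : Prop := out = get_bytes_array_alt start_pos type_size header image_width image_height band_count
instance (start_pos : Int) (type_size : Int) (header : List Int) (image_width : Int) (image_height : Int) (band_count : Int) (out : List (List Int)) : Decidable (Spec_get_bytes_array start_pos type_size header image_width image_height band_count out) := by unfold Spec_get_bytes_array; infer_instance

-- ===== CLAIM (what is proved, stated in full; the proofs are below) =====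
def Claim_equal_get_bytes_array : Prop := ∀ (start_pos : Int) (type_size : Int) (header : List Int) (image_width : Int) (image_height : Int) (band_count : Int), Dom_get_bytes_array start_pos type_size header image_width image_height band_count → Pre_get_bytes_array start_pos type_size header image_width image_height band_count → Spec_get_bytes_array start_pos type_size header image_width image_height band_count (get_bytes_array start_pos type_size header image_width image_height band_count)

-- ===== LEMMAS AND PROOFS =====

-- A's ceiling-by-cases equals B's negated floor division
theorem pv_ceil_eq (w : Int) :
    (if PySem.Int.mod w 256 = 0 then PySem.Int.floordiv w 256 else PySem.Int.floordiv w 256 + 1)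
      = -(PySem.Int.floordiv (-w) 256) := by
  rw [PySem.Int.floordiv_eq_ediv_of_pos (by norm_num), PySem.Int.mod_eq_emod_of_pos (by norm_num),
    PySem.Int.floordiv_eq_ediv_of_pos (by norm_num)]
  split_ifs with h <;> omega

-- a slice of a mapped pyRange is the mapped sub-range
theorem pv_slice_map_pyRange (c : Int → Int) (N a b : Int) (ha : 0 ≤ a) (hab : a ≤ b) (hb : b ≤ N) :
    PySem.List.slice ((PySem.List.pyRange 0 N 1).map c) (some a) (some b)
      = (PySem.List.pyRange a b 1).map c := by
  have hsplit : PySem.List.pyRange 0 N 1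
      = (PySem.List.pyRange 0 a 1 ++ PySem.List.pyRange a b 1) ++ PySem.List.pyRange b N 1 := by
    rw [← PySem.List.pyRange_one_append 0 a b ha hab,
      ← PySem.List.pyRange_one_append 0 b N (le_trans ha hab) hb]
  have hlen1 : ((PySem.List.pyRange 0 a 1).map c).length = a.toNat := by
    simp [PySem.List.length_pyRange_one]
  have hlen2 : ((PySem.List.pyRange a b 1).map c).length = (b - a).toNat := by
    simp [PySem.List.length_pyRange_one]
  rw [hsplit, PySem.List.slice_toNat _ ha (le_trans ha hab)]
  simp only [List.map_append, List.append_assoc]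
  rw [show b.toNat - a.toNat = (b - a).toNat from by omega, ← hlen1, List.drop_left]
  exact List.take_left' hlen2

theorem pv_get_bytes_array_eq (start_pos : Int) (type_size : Int) (header : List Int)
    (image_width : Int) (image_height : Int) (band_count : Int) :
    get_bytes_array start_pos type_size header image_width image_height band_count
      = get_bytes_array_alt start_pos type_size header image_width image_height band_count := by
  unfold get_bytes_array get_bytes_array_alt
  by_cases hbc : band_count ≤ 0
  · rw [if_pos hbc, PySem.List.pyRange_one_eq_nil hbc]
    rfl
  rw [if_neg hbc]
  rw [pv_ceil_eq image_width, pv_ceil_eq image_height]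
  set tx := -(PySem.Int.floordiv (-image_width) 256) with htx
  set ty := -(PySem.Int.floordiv (-image_height) 256) with hty
  set c : Int → Int := fun k => pvGetLong header (start_pos + k * type_size) type_size with hc
  -- collapse A's appending folds into map / flatMap
  have hrow : ∀ i : Int,
      (PySem.List.pyRange 0 tx 1).foldl (fun offsets j =>
          offsets ++ [pvGetLong header (start_pos + (i * tx + j) * type_size) type_size]) []
        = (PySem.List.pyRange 0 tx 1).map (fun j => c (i * tx + j)) := by
    intro i
    exact PySem.List.foldl_append_singleton_eq_map _ _ []
  have hband : ∀ acc : List (List Int),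
      (PySem.List.pyRange 0 ty 1).foldl (fun strip_offsets i =>
          strip_offsets ++ [(PySem.List.pyRange 0 tx 1).foldl (fun offsets j =>
            offsets ++ [pvGetLong header (start_pos + (i * tx + j) * type_size) type_size]) []]) acc
        = acc ++ (PySem.List.pyRange 0 ty 1).map
            (fun i => (PySem.List.pyRange 0 tx 1).map (fun j => c (i * tx + j))) := by
    intro acc
    rw [PySem.List.foldl_congr_mem _ _
      (fun strip_offsets i => strip_offsets ++ [(PySem.List.pyRange 0 tx 1).map (fun j => c (i * tx + j))]) acc
      (by intro s i _; rw [hrow i])]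
    exact PySem.List.foldl_append_singleton_eq_map _ _ acc
  have houter :
      (PySem.List.pyRange 0 band_count 1).foldl (fun strip_offsets _ =>
          (PySem.List.pyRange 0 ty 1).foldl (fun strip_offsets i =>
            strip_offsets ++ [(PySem.List.pyRange 0 tx 1).foldl (fun offsets j =>
              offsets ++ [pvGetLong header (start_pos + (i * tx + j) * type_size) type_size]) []]) strip_offsets) []
        = (PySem.List.pyRange 0 band_count 1).flatMap (fun _ =>
            (PySem.List.pyRange 0 ty 1).map
              (fun i => (PySem.List.pyRange 0 tx 1).map (fun j => c (i * tx + j)))) := by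
    rw [PySem.List.foldl_congr_mem _ _
      (fun strip_offsets _ => strip_offsets ++ (PySem.List.pyRange 0 ty 1).map
        (fun i => (PySem.List.pyRange 0 tx 1).map (fun j => c (i * tx + j)))) []
      (by intro s x _; exact hband s)]
    exact PySem.List.foldl_append_eq_flatMap _ _ []
  rw [houter]
  -- per-row: A's mapped row equals B's slice of the flat pass
  congr 1
  funext
  apply List.map_congr_left
  intro i hi
  rw [PySem.List.mem_pyRange_one] at hi
  by_cases htx0 : 0 < tx
  · -- positive tile counts: flat has tx*ty entries, row i is the exact sub-range
    have hty0 : 0 < ty := lt_of_le_of_lt hi.1 hi.2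
    have hmax : max tx 0 * max ty 0 = tx * ty := by
      rw [max_eq_left (le_of_lt htx0), max_eq_left (le_of_lt hty0)]
    rw [hmax, pv_slice_map_pyRange c (tx * ty) (i * tx) ((i + 1) * tx)
      (mul_nonneg hi.1 (le_of_lt htx0)) (by nlinarith) (by nlinarith)]
    rw [PySem.List.pyRange_one 0 tx, PySem.List.pyRange_one (i * tx) ((i + 1) * tx)]
    simp only [List.map_map]
    rw [show (i + 1) * tx - i * tx = tx - 0 from by ring]
    apply List.map_congr_left
    intro k _
    simp only [Function.comp_apply]
    ring_nf
  · -- tx ≤ 0: the row is empty on both sides (flat is empty, the slice of [] is [])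
    have h1 : PySem.List.pyRange 0 tx 1 = [] := PySem.List.pyRange_one_eq_nil (by omega)
    have h2 : max tx 0 * max ty 0 = tx * max ty 0 ∨ max tx 0 * max ty 0 = 0 := by
      rcases le_or_gt tx 0 with h | h
      · right; rw [max_eq_right h]; ring
      · exact absurd h htx0
    have hflat : PySem.List.pyRange 0 (max tx 0 * max ty 0) 1 = [] := by
      rcases h2 with h | h
      · rw [h]; exact PySem.List.pyRange_one_eq_nil (by nlinarith [le_max_right ty 0])
      · rw [h]; exact PySem.List.pyRange_one_eq_nil le_rfl
    rw [h1, hflat]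
    simp [PySem.List.slice]

-- ===== VERDICT (by name: the statement is the Claim_ definition above) =====
theorem get_bytes_array_spec : Claim_equal_get_bytes_array := by
  intro start_pos type_size header image_width image_height band_count _ _
  unfold Spec_get_bytes_array
  exact pv_get_bytes_array_eq start_pos type_size header image_width image_height band_count
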